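-- pv_equiv track=rewrite | github.com/bloopdex/sql-generator | src/agents/sql_agent.py | _strip_parentheses_regions
-- ===== SOURCE A (Python) =====
-- def _strip_parentheses_regions(s: str) -> str:
--     out = []
--     depth = 0
--     in_sq = False
--     in_dq = False
--     i = 0
--     while i < len(s):
--         ch = s[i]
--         if ch == "'" and not in_dq:
--             in_sq = not in_sq
--             out.append(ch)
--         elif ch == '"' and not in_sq:
--             in_dq = not in_dq
--             out.append(ch)
--         else:
--             if not in_sq and not in_dq:
--                 if ch == "(":
--                     depth += 1
--                     out.append(ch)
--                 elif ch == ")":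
--                     if depth > 0:
--                         depth -= 1
--                     out.append(ch)
--                 else:
--                     out.append(ch if depth == 0 else " ")
--             else:
--                 out.append(ch)
--         i += 1
--     return "".join(out)
-- ===== SOURCE B (Python) =====
-- def _strip_parentheses_regions(s: str) -> str:
--     # pass 1: mark each position that is quote-related (a quote char or inside quotes)
--     prot = []
--     in_sq = in_dq = False
--     for ch in s:
--         prot.append(in_sq or in_dq or ch == "'" or ch == '"')
--         if ch == "'" and not in_dq:
--             in_sq = not in_sq
--         elif ch == '"' and not in_sq:
--             in_dq = not in_dq
--     # pass 2: paren-depth blanking, ignoring protected positions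
--     res = []
--     depth = 0
--     for ch, p in zip(s, prot):
--         if p:
--             res.append(ch)
--         elif ch == "(":
--             depth += 1
--             res.append(ch)
--         elif ch == ")":
--             if depth > 0:
--                 depth -= 1
--             res.append(ch)
--         else:
--             res.append(ch if depth == 0 else " ")
--     return "".join(res)
-- ===== Notes on version B (the rewrite author's own statement) =====
-- stated objective: alternative
-- what changed: Single stateful while-loop replaced by a two-pass decomposition: one pass computes a per-position quoted/quote-char boolean mask, a second pass does paren-depth blanking over the zipped string, consulting only that mask.
import Mathlib
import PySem

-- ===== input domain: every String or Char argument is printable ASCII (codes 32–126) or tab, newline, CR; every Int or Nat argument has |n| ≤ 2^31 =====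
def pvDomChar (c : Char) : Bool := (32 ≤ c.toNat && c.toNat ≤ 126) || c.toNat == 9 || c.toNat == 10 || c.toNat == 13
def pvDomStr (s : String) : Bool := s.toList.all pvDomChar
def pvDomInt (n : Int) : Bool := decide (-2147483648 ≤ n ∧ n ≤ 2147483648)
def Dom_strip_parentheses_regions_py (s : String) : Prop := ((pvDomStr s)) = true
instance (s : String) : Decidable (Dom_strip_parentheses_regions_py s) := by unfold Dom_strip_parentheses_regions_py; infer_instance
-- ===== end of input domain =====

-- B replaces A's single stateful scan by a two-pass decomposition (quote mask, then paren blanking); same cost, alternative structure.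


-- ===== PORT A =====
-- A's while-loop over s, carrying (depth, in_sq, in_dq); out.append becomes cons.
def stripA_loop : List Char → Int → Bool → Bool → List Char
  | [], _, _, _ => []
  | ch :: rest, depth, in_sq, in_dq =>
    if ch = '\'' ∧ ¬ in_dq then
      ch :: stripA_loop rest depth (!in_sq) in_dq
    else if ch = '"' ∧ ¬ in_sq then
      ch :: stripA_loop rest depth in_sq (!in_dq)
    else
      if ¬ in_sq ∧ ¬ in_dq then
        if ch = '(' then
          ch :: stripA_loop rest (depth + 1) in_sq in_dq
        else if ch = ')' then
          ch :: stripA_loop rest (if depth > 0 then depth - 1 else depth) in_sq in_dq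
        else
          (if depth = 0 then ch else ' ') :: stripA_loop rest depth in_sq in_dq
      else
        ch :: stripA_loop rest depth in_sq in_dq

def strip_parentheses_regions_py (s : String) : String :=
  String.mk (stripA_loop s.toList 0 false false)

-- ===== PORT B =====
-- B pass 1: per-position quote mask.
def stripB_prot : List Char → Bool → Bool → List Bool
  | [], _, _ => []
  | ch :: rest, in_sq, in_dq =>
    (in_sq || in_dq || ch = '\'' || ch = '"') ::
      (if ch = '\'' ∧ ¬ in_dq then stripB_prot rest (!in_sq) in_dq
       else if ch = '"' ∧ ¬ in_sq then stripB_prot rest in_sq (!in_dq)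
       else stripB_prot rest in_sq in_dq)

-- B pass 2: paren-depth blanking over the zipped string.
def stripB_emit : List (Char × Bool) → Int → List Char
  | [], _ => []
  | (ch, p) :: rest, depth =>
    if p then ch :: stripB_emit rest depth
    else if ch = '(' then ch :: stripB_emit rest (depth + 1)
    else if ch = ')' then ch :: stripB_emit rest (if depth > 0 then depth - 1 else depth)
    else (if depth = 0 then ch else ' ') :: stripB_emit rest depth

def strip_parentheses_regions_py_alt (s : String) : String :=
  String.mk (stripB_emit (s.toList.zip (stripB_prot s.toList false false)) 0)

-- ===== PRECONDITION & SPEC =====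
def Spec_strip_parentheses_regions_py (s : String) (out : String) : Prop := out = strip_parentheses_regions_py_alt s
instance (s : String) (out : String) : Decidable (Spec_strip_parentheses_regions_py s out) := by unfold Spec_strip_parentheses_regions_py; infer_instance

-- ===== CLAIM (what is proved, stated in full; the proofs are below) =====
def Claim_equal_strip_parentheses_regions_py : Prop := ∀ (s : String), Dom_strip_parentheses_regions_py s → Spec_strip_parentheses_regions_py s (strip_parentheses_regions_py s)

-- ===== LEMMAS AND PROOFS =====
theorem stripAB_eq : ∀ (cs : List Char) (d : Int) (sq dq : Bool),
    stripA_loop cs d sq dq = stripB_emit (cs.zip (stripB_prot cs sq dq)) d := by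
  intro cs
  induction cs with
  | nil => intro d sq dq; rfl
  | cons ch rest ih =>
    intro d sq dq
    cases sq <;> cases dq <;>
      by_cases h1 : ch = '\'' <;> by_cases h2 : ch = '"' <;>
      by_cases h3 : ch = '(' <;> by_cases h4 : ch = ')' <;>
      simp [stripA_loop, stripB_prot, stripB_emit, h1, h2, h3, h4, ih]

-- ===== VERDICT (by name: the statement is the Claim_ definition above) =====
theorem strip_parentheses_regions_py_spec : Claim_equal_strip_parentheses_regions_py := by
  intro s _
  unfold Spec_strip_parentheses_regions_py strip_parentheses_regions_py strip_parentheses_regions_py_alt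
  rw [stripAB_eq]
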